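-- pv_equiv track=rewrite | github.com/balaji-muthukumaran-12086/AI_AUTOMATION_CODE_GENERATOR | knowledge_base/rag_server.py | _order_files
-- ===== SOURCE A (Python) =====
-- FILE_TYPE_ORDER = [
--     "LOCATORS", "FIELDS", "DATA_CONSTANTS", "CONSTANTS",
--     "ENTITY", "BASE", "PREPROCESS", "FORM_UTIL",
--     "API_UTIL", "ACTIONS_UTIL",
--     "DATA_JSON", "CONF_JSON",
--     "SKELETON", "SKELETON_JSON", "OTHER",
-- ]
--
-- def _order_files(files: dict) -> dict:
--     """Return files dict sorted by canonical file-type order."""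
--     ordered = {}
--     for ft in FILE_TYPE_ORDER:
--         if ft in files:
--             ordered[ft] = files[ft]
--     for ft in files:
--         if ft not in ordered:
--             ordered[ft] = files[ft]
--     return ordered
-- ===== SOURCE B (Python) =====
-- FILE_TYPE_ORDER = [
--     "LOCATORS", "FIELDS", "DATA_CONSTANTS", "CONSTANTS",
--     "ENTITY", "BASE", "PREPROCESS", "FORM_UTIL",
--     "API_UTIL", "ACTIONS_UTIL",
--     "DATA_JSON", "CONF_JSON",
--     "SKELETON", "SKELETON_JSON", "OTHER",
-- ]
--
-- def _order_files(files: dict) -> dict: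
--     """Return files dict sorted by canonical file-type order."""
--     rank = {ft: i for i, ft in enumerate(FILE_TYPE_ORDER)}
--     sentinel = len(FILE_TYPE_ORDER)
--     return dict(sorted(files.items(), key=lambda kv: rank.get(kv[0], sentinel)))
-- ===== Notes on version B (the rewrite author's own statement) =====
-- stated objective: idiomatic
-- what changed: Replaces A's two explicit passes (scan the canonical order list, then append leftover keys) with a single stable sort of the dict items keyed by a precomputed canonical-rank map, with one sentinel rank for unknown types so insertion order is kept among them.
import Mathlib
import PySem

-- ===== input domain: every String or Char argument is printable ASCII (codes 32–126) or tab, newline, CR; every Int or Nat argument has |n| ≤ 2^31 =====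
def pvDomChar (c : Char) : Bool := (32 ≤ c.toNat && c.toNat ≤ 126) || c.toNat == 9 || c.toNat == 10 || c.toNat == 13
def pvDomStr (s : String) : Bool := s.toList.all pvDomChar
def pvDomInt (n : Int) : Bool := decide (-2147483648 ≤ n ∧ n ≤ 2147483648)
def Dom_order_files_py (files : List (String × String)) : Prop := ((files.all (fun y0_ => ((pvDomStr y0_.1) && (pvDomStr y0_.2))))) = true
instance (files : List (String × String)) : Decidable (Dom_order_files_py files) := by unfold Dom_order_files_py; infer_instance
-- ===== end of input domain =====

-- B replaces A's two membership-scan passes by one stable sort of the items under a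
-- precomputed canonical-rank map (objective: idiomatic; same result, not claimed faster).

-- ===== PORT A =====
def FILE_TYPE_ORDER : List String :=
  ["LOCATORS", "FIELDS", "DATA_CONSTANTS", "CONSTANTS",
   "ENTITY", "BASE", "PREPROCESS", "FORM_UTIL",
   "API_UTIL", "ACTIONS_UTIL",
   "DATA_JSON", "CONF_JSON",
   "SKELETON", "SKELETON_JSON", "OTHER"]

def order_files_py (files : List (String × String)) : List (String × String) :=
  let d : PySem.Dict String String := PySem.Dict.mk files
  -- ordered = {}; for ft in FILE_TYPE_ORDER: if ft in files: ordered[ft] = files[ft]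
  let ordered1 : PySem.Dict String String :=
    FILE_TYPE_ORDER.foldl
      (fun od ft => if d.contains ft then od.insert ft (d.getD ft "") else od)
      PySem.Dict.empty
  -- for ft in files: if ft not in ordered: ordered[ft] = files[ft]
  let ordered2 : PySem.Dict String String :=
    d.keys.foldl
      (fun od ft => if od.contains ft then od else od.insert ft (d.getD ft ""))
      ordered1
  ordered2.items

-- ===== PORT B =====
def order_files_py_alt (files : List (String × String)) : List (String × String) :=
  -- rank = {ft: i for i, ft in enumerate(FILE_TYPE_ORDER)}
  let rank : PySem.Dict String Int :=
    (PySem.List.enumerate FILE_TYPE_ORDER).foldl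
      (fun r p => r.insert p.2 p.1) PySem.Dict.empty
  -- sentinel = len(FILE_TYPE_ORDER)
  let sentinel : Int := (FILE_TYPE_ORDER.length : Int)
  -- dict(sorted(files.items(), key=lambda kv: rank.get(kv[0], sentinel)))
  (PySem.Dict.ofList
    (PySem.List.sorted files (fun kv => rank.getD kv.1 sentinel))).items

-- ===== PRECONDITION & SPEC =====
-- Pre_ requires distinct keys: the Python argument is a dict, whose keys are necessarily
-- distinct, so association lists with duplicate keys represent no input A ever receives.
def Pre_order_files_py (files : List (String × String)) : Prop :=
  (files.map Prod.fst).Nodup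
instance (files : List (String × String)) : Decidable (Pre_order_files_py files) := by
  unfold Pre_order_files_py; infer_instance

def pvWitness_order_files_py : (List (String × String)) :=
  [("OTHER", "o.py"), ("helpers", "h.py"), ("LOCATORS", "l.py")]

def Spec_order_files_py (files : List (String × String)) (out : List (String × String)) : Prop := out = order_files_py_alt files
instance (files : List (String × String)) (out : List (String × String)) : Decidable (Spec_order_files_py files out) := by unfold Spec_order_files_py; infer_instance

-- ===== CLAIM (what is proved, stated in full; the proofs are below) =====
def Claim_equal_order_files_py : Prop := ∀ (files : List (String × String)), Dom_order_files_py files → Pre_order_files_py files → Spec_order_files_py files (order_files_py files)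

-- ===== LEMMAS AND PROOFS =====

theorem pv_rank_getD (l : List String) (hl : l.Nodup) (s : Int)
    (d : PySem.Dict String Int) (k : String) (dflt : Int) :
    ((PySem.List.enumerate l s).foldl (fun r p => r.insert p.2 p.1) d).getD k dflt
      = if k ∈ l then s + (l.idxOf k : Int) else d.getD k dflt := by
  induction l generalizing s d with
  | nil => simp
  | cons a t ih =>
    rw [PySem.List.enumerate_cons]
    simp only [List.foldl_cons]
    rw [ih (by simp_all) (s+1) (d.insert a s)]
    by_cases hk : k = a
    · subst hk
      have hkt : k ∉ t := by simp_all
      simp [hkt, PySem.Dict.getD_insert_self, List.idxOf_cons_self]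
    · by_cases hmem : k ∈ t
      · simp [hmem, hk, List.idxOf_cons_ne _ (by simpa using Ne.symm hk)]
        ring
      · simp [hmem, hk, PySem.Dict.getD_insert_of_ne _ _ _ hk]
theorem pv_insertBy_middle {α : Type} (key : α → Int) (x : α) (B1 B2 : List α)
    (h1 : ∀ y ∈ B1, key y ≤ key x) (h2 : ∀ y ∈ B2, key x < key y) :
    PySem.List.insertBy (fun a b => decide (key a < key b)) x (B1 ++ B2) = B1 ++ x :: B2 := by
  induction B1 with
  | nil =>
    cases B2 with
    | nil => simp [PySem.List.insertBy]
    | cons z zs =>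
      simp [PySem.List.insertBy, h2 z (by simp)]
  | cons y ys ih =>
    have : ¬ key x < key y := not_lt.mpr (h1 y (by simp))
    simp only [List.cons_append, PySem.List.insertBy, this, decide_false]
    simp [ih (fun y hy => h1 y (by simp [hy]))]

theorem pv_sorted_buckets {α : Type} (xs : List α) (key : α → Int) (n : Nat)
    (hb : ∀ x ∈ xs, 0 ≤ key x ∧ key x ≤ (n : Int)) :
    PySem.List.sorted xs key false
      = (List.range (n + 1)).flatMap (fun (r : Nat) => xs.filter (fun x => decide (key x = (r : Int)))) := by
  induction xs using List.reverseRecOn with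
  | nil => simp [PySem.List.sorted_eq_foldl_insertBy]
  | append_singleton xs x ih =>
    have hx := hb x (by simp)
    have hxs : ∀ y ∈ xs, 0 ≤ key y ∧ key y ≤ (n : Int) := fun y hy => hb y (by simp [hy])
    set r : Nat := (key x).toNat with hr
    have hkx : key x = (r : Int) := by omega
    have hrn : r ≤ n := by omega
    have hsplit : n + 1 = (r + 1) + (n - r) := by omega
    have hrange : List.range (n + 1) = List.range (r + 1) ++ (List.range (n - r)).map ((r + 1) + ·) := by
      rw [hsplit, List.range_add]
    have hstep : PySem.List.sorted (xs ++ [x]) key false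
        = PySem.List.insertBy (fun a b => decide (key a < key b)) x (PySem.List.sorted xs key false) := by
      rw [PySem.List.sorted_eq_foldl_insertBy, PySem.List.sorted_eq_foldl_insertBy, List.foldl_append]
      simp
    rw [hstep, ih hxs, hrange]
    rw [List.flatMap_append, List.flatMap_append]
    set F : Nat → List α := fun s => xs.filter (fun y => decide (key y = (s : Int))) with hF
    set F' : Nat → List α := fun s => (xs ++ [x]).filter (fun y => decide (key y = (s : Int))) with hF'
    have hmid : PySem.List.insertBy (fun a b => decide (key a < key b)) x
        ((List.range (r + 1)).flatMap F ++ ((List.range (n - r)).map ((r + 1) + ·)).flatMap F)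
        = (List.range (r + 1)).flatMap F ++ x :: ((List.range (n - r)).map ((r + 1) + ·)).flatMap F := by
      apply pv_insertBy_middle
      · intro y hy
        rcases List.mem_flatMap.mp hy with ⟨s, hs, hyF⟩
        have hs' : s < r + 1 := List.mem_range.mp hs
        simp only [hF] at hyF
        have := of_decide_eq_true (List.mem_filter.mp hyF).2
        omega
      · intro y hy
        rcases List.mem_flatMap.mp hy with ⟨s, hs, hyF⟩
        rcases List.mem_map.mp hs with ⟨j, hj, rfl⟩
        simp only [hF] at hyF
        have h := of_decide_eq_true (List.mem_filter.mp hyF).2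
        push_cast at h
        omega
    rw [hmid]
    -- right side: buckets of xs ++ [x]
    have hF'eq : ∀ s : Nat, F' s = F s ++ (if key x = (s : Int) then [x] else []) := by
      intro s; simp only [hF, hF', List.filter_append]
      congr 1
      by_cases h : key x = (s : Int) <;> simp [List.filter, h]
    have htail : ((List.range (n - r)).map ((r + 1) + ·)).flatMap F'
        = ((List.range (n - r)).map ((r + 1) + ·)).flatMap F := by
      apply List.flatMap_congr
      intro s hs
      rcases List.mem_map.mp hs with ⟨j, hj, rfl⟩
      rw [hF'eq]
      have hne : ¬ key x = ((r : Int) + 1 + (j : Int)) := by omega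
      simp [hne]
    have hhead : (List.range (r + 1)).flatMap F' = (List.range (r + 1)).flatMap F ++ [x] := by
      rw [List.range_succ, List.flatMap_append, List.flatMap_append]
      have h1 : (List.range r).flatMap F' = (List.range r).flatMap F := by
        apply List.flatMap_congr
        intro s hs
        have hs' : s < r := List.mem_range.mp hs
        rw [hF'eq]
        have : ¬ key x = (s : Int) := by omega
        simp [this]
      rw [h1]
      simp [hF'eq r, hkx]
    rw [htail, hhead]
    simp

theorem pv_filter_key (files : List (String × String)) (hnd : (files.map Prod.fst).Nodup)
    (k : String) :
    files.filter (fun kv => kv.1 == k)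
      = (if (PySem.Dict.mk files).contains k
         then [(k, (PySem.Dict.mk files).getD k "")] else []) := by
  induction files with
  | nil => simp [PySem.Dict.contains]
  | cons p t ih =>
    have hnd' : (t.map Prod.fst).Nodup := (List.nodup_cons.mp (by simpa using hnd)).2
    have hp : p.1 ∉ t.map Prod.fst := (List.nodup_cons.mp (by simpa using hnd)).1
    by_cases h : p.1 = k
    · subst h
      have ht : t.filter (fun kv => kv.1 == p.1) = [] := by
        apply List.filter_eq_nil_iff.mpr
        intro kv hkv hb
        exact hp (by simpa [(eq_of_beq hb)] using List.mem_map_of_mem (f := Prod.fst) hkv)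
      simp [ht, PySem.Dict.contains, PySem.Dict.getD, PySem.Dict.get?]
    · have hb : (p.1 == k) = false := beq_eq_false_iff_ne.mpr h
      rw [List.filter_cons]
      simp only [hb, Bool.false_eq_true, if_false]
      rw [ih hnd']
      simp only [PySem.Dict.contains, PySem.Dict.getD, PySem.Dict.get?, List.any_cons,
        List.find?, hb, Bool.false_or]

theorem pv_loop2 (v : String → String) (ks : List String) (hks : ks.Nodup) :
    ∀ od : PySem.Dict String String,
    (ks.foldl (fun od ft => if od.contains ft then od else od.insert ft (v ft)) od).items
      = od.items ++ (ks.filter (fun ft => !od.contains ft)).map (fun ft => (ft, v ft)) := by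
  induction ks with
  | nil => simp
  | cons a t ih =>
    intro od
    have ha : a ∉ t := (List.nodup_cons.mp hks).1
    have ht : t.Nodup := (List.nodup_cons.mp hks).2
    simp only [List.foldl_cons, List.filter_cons]
    by_cases h : od.contains a
    · simp only [h, if_true, Bool.not_true]
      rw [ih ht od]
      simp
    · have hfalse : od.contains a = false := by simpa using h
      simp only [hfalse, Bool.not_false, Bool.false_eq_true, if_false, if_true]
      rw [ih ht (od.insert a (v a))]
      rw [PySem.Dict.items_insert_of_not_contains _ _ hfalse]
      have : t.filter (fun ft => !(od.insert a (v a)).contains ft)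
           = t.filter (fun ft => !od.contains ft) := by
        apply List.filter_congr
        intro x hx
        have hxa : (x == a) = false := beq_eq_false_iff_ne.mpr (fun hxa => ha (hxa ▸ hx))
        rw [PySem.Dict.contains_insert, hxa]
        simp
      rw [this]
      simp

theorem pv_items_ofList {ν : Type} (l : List (String × ν)) (hnd : (l.map Prod.fst).Nodup) :
    (PySem.Dict.ofList l).items = l := by
  show (List.foldl (fun acc p => acc.insert p.1 p.2) PySem.Dict.empty l).items = l
  rw [PySem.Dict.items_foldl_insert_fresh l Prod.fst Prod.snd PySem.Dict.empty
        (fun a _ => by simp) (by simpa using hnd)]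
  simp [PySem.Dict.empty]

theorem pv_idxOf_not_mem {l : List String} {a : String} (h : a ∉ l) : l.idxOf a = l.length :=
  List.idxOf_eq_length_iff.mpr h

theorem pv_known (files : List (String × String)) (hnd : (files.map Prod.fst).Nodup)
    (ord : List String) (hord : ord.Nodup) :
    (ord.filter (fun ft => (PySem.Dict.mk files).contains ft)).map
        (fun ft => (ft, (PySem.Dict.mk files).getD ft ""))
      = (List.range ord.length).flatMap
          (fun (r : Nat) => files.filter (fun kv => decide (ord.idxOf kv.1 = r))) := by
  induction ord using List.reverseRecOn with
  | nil => simp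
  | append_singleton ord a ih =>
    have hord' : ord.Nodup := (List.nodup_append.mp hord).1
    have ha : a ∉ ord := by
      have hcons : (a :: ord).Nodup := by simpa using List.nodup_append_comm.mp hord
      exact (List.nodup_cons.mp hcons).1
    rw [List.filter_append, List.map_append]
    rw [List.length_append, List.length_singleton, List.range_succ, List.flatMap_append]
    congr 1
    · rw [ih hord']
      apply List.flatMap_congr
      intro r hr
      have hrlt : r < ord.length := List.mem_range.mp hr
      apply List.filter_congr
      intro kv _
      apply decide_eq_decide.mpr
      rw [List.idxOf_append]
      by_cases hm : kv.1 ∈ ord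
      · rw [if_pos hm]
      · have h1 : ord.idxOf kv.1 = ord.length := pv_idxOf_not_mem hm
        have h2 : ([a].idxOf kv.1) + ord.length ≠ r := by omega
        simp only [hm, if_false]
        omega
    · have hb : files.filter (fun kv => decide ((ord ++ [a]).idxOf kv.1 = ord.length))
          = files.filter (fun kv => kv.1 == a) := by
        apply List.filter_congr
        intro kv _
        rw [List.idxOf_append]
        by_cases hm : kv.1 ∈ ord
        · have h1 : ord.idxOf kv.1 < ord.length := List.idxOf_lt_length_of_mem hm
          have h2 : (kv.1 == a) = false := beq_eq_false_iff_ne.mpr (fun he => ha (he ▸ hm))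
          simp [hm, h2]
          omega
        · simp only [hm, if_false]
          by_cases he : kv.1 = a
          · subst he
            simp [List.idxOf_cons_self]
          · have h2 : (kv.1 == a) = false := beq_eq_false_iff_ne.mpr he
            have h2' : (a == kv.1) = false := beq_eq_false_iff_ne.mpr (Ne.symm he)
            have h3 : [a].idxOf kv.1 = 1 := by
              simp [List.idxOf, List.findIdx, List.findIdx.go, h2']
            simp [h3, h2]
      rw [List.flatMap_singleton, hb, pv_filter_key files hnd a]
      rw [List.filter_singleton]
      by_cases hc : (PySem.Dict.mk files).contains a = true
      · rw [if_pos hc, hc]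
        simp
      · have hc' : (PySem.Dict.mk files).contains a = false := Bool.eq_false_iff.mpr hc
        rw [if_neg hc, hc']
        simp

theorem pv_main (files : List (String × String)) (hnd : (files.map Prod.fst).Nodup) :
    order_files_py files = order_files_py_alt files := by
  have hnodupOrd : FILE_TYPE_ORDER.Nodup := by decide
  -- ===== A side =====
  have hdc : ∀ kv ∈ files, (PySem.Dict.mk files).contains kv.1 = true := by
    intro kv hkv
    simp only [PySem.Dict.contains]
    exact List.any_eq_true.mpr ⟨kv, hkv, by simp⟩
  have hgd : ∀ kv ∈ files, (PySem.Dict.mk files).getD kv.1 "" = kv.2 := by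
    intro kv hkv
    exact PySem.Dict.getD_of_mem_items (d := PySem.Dict.mk files) (k := kv.1) (v := kv.2)
      (by simpa using hkv) (by simpa [PySem.Dict.keys] using hnd) ""
  have hA : order_files_py files
      = ((FILE_TYPE_ORDER.filter (fun ft => (PySem.Dict.mk files).contains ft)).map
          (fun ft => (ft, (PySem.Dict.mk files).getD ft "")))
        ++ (files.filter
             (fun kv => decide (FILE_TYPE_ORDER.idxOf kv.1 = FILE_TYPE_ORDER.length))) := by
    unfold order_files_py
    simp only []
    rw [PySem.List.foldl_if_eq_foldl_filter (fun ft => (PySem.Dict.mk files).contains ft)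
        (fun od ft => od.insert ft ((PySem.Dict.mk files).getD ft "")) FILE_TYPE_ORDER PySem.Dict.empty]
    have hKnodup : (FILE_TYPE_ORDER.filter (fun ft => (PySem.Dict.mk files).contains ft)).Nodup :=
      hnodupOrd.filter _
    have h1 := PySem.Dict.items_foldl_insert_fresh
        (FILE_TYPE_ORDER.filter (fun ft => (PySem.Dict.mk files).contains ft))
        (fun ft => ft) (fun ft => (PySem.Dict.mk files).getD ft "") PySem.Dict.empty
        (fun a _ => by simp) (by simpa using hKnodup)
    have hkeys : ((FILE_TYPE_ORDER.filter (fun ft => (PySem.Dict.mk files).contains ft)).foldl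
          (fun od ft => od.insert ft ((PySem.Dict.mk files).getD ft "")) PySem.Dict.empty).keys
        = FILE_TYPE_ORDER.filter (fun ft => (PySem.Dict.mk files).contains ft) := by
      have hie0 : (PySem.Dict.empty : PySem.Dict String String).items = [] := rfl
      simp only [PySem.Dict.keys, h1, hie0, List.nil_append, List.map_map]
      have hid0 : ∀ a ∈ FILE_TYPE_ORDER.filter (fun ft => (PySem.Dict.mk files).contains ft),
          ((fun x : String × String => x.1) ∘
            (fun a => ((fun ft => ft) a, (fun ft => (PySem.Dict.mk files).getD ft "") a))) a = a :=
        fun a _ => rfl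
      rw [List.map_congr_left hid0]
      exact List.map_id' _
    have hkeysmk : (PySem.Dict.mk files).keys = files.map Prod.fst := by
      simp [PySem.Dict.keys]
    rw [hkeysmk, pv_loop2 (fun ft => (PySem.Dict.mk files).getD ft "") (files.map Prod.fst) hnd]
    have hie : (PySem.Dict.empty : PySem.Dict String String).items = [] := rfl
    rw [h1, hie, List.nil_append]
    congr 1
    -- tail: filter over map fst, then re-pair
    rw [List.filter_map]
    have hq : (files.filter ((fun ft => !((FILE_TYPE_ORDER.filter
            (fun ft => (PySem.Dict.mk files).contains ft)).foldl
            (fun od ft => od.insert ft ((PySem.Dict.mk files).getD ft "")) PySem.Dict.empty).contains ft)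
          ∘ Prod.fst))
        = files.filter (fun kv => decide (FILE_TYPE_ORDER.idxOf kv.1 = FILE_TYPE_ORDER.length)) := by
      apply List.filter_congr
      intro kv hkv
      have hmemiff : ((FILE_TYPE_ORDER.filter (fun ft => (PySem.Dict.mk files).contains ft)).foldl
            (fun od ft => od.insert ft ((PySem.Dict.mk files).getD ft "")) PySem.Dict.empty).contains kv.1
          = decide (kv.1 ∈ FILE_TYPE_ORDER.filter (fun ft => (PySem.Dict.mk files).contains ft)) := by
        rw [PySem.Dict.contains_eq_decide_mem_keys, hkeys]
      simp only [Function.comp, hmemiff]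
      by_cases hm : kv.1 ∈ FILE_TYPE_ORDER
      · have h1' : kv.1 ∈ FILE_TYPE_ORDER.filter (fun ft => (PySem.Dict.mk files).contains ft) :=
          List.mem_filter.mpr ⟨hm, hdc kv hkv⟩
        have h2' : FILE_TYPE_ORDER.idxOf kv.1 < FILE_TYPE_ORDER.length :=
          List.idxOf_lt_length_of_mem hm
        have hne : FILE_TYPE_ORDER.idxOf kv.1 ≠ FILE_TYPE_ORDER.length := by omega
        simp only [decide_eq_true h1', Bool.not_true]
        exact (decide_eq_false hne).symm
      · have h1' : kv.1 ∉ FILE_TYPE_ORDER.filter (fun ft => (PySem.Dict.mk files).contains ft) := by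
          intro hc; exact hm (List.mem_filter.mp hc).1
        simp only [decide_eq_false h1', Bool.not_false]
        exact (decide_eq_true (pv_idxOf_not_mem hm)).symm
    rw [hq]
    have hid : ∀ kv ∈ files.filter (fun kv => decide (FILE_TYPE_ORDER.idxOf kv.1 = FILE_TYPE_ORDER.length)),
        ((fun ft => (ft, (PySem.Dict.mk files).getD ft "")) ∘ Prod.fst) kv = kv := by
      intro kv hkv
      have h := hgd kv (List.mem_of_mem_filter hkv)
      simp [Function.comp, h]
    rw [List.map_map, List.map_congr_left hid]
    exact List.map_id' _
  -- ===== B side =====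
  have hkeyfun : (fun kv : String × String =>
        ((PySem.List.enumerate FILE_TYPE_ORDER).foldl
          (fun r p => r.insert p.2 p.1) PySem.Dict.empty).getD kv.1 (FILE_TYPE_ORDER.length : Int))
      = fun kv : String × String => ((FILE_TYPE_ORDER.idxOf kv.1 : Nat) : Int) := by
    funext kv
    rw [pv_rank_getD FILE_TYPE_ORDER hnodupOrd 0 PySem.Dict.empty kv.1 (FILE_TYPE_ORDER.length : Int)]
    by_cases hm : kv.1 ∈ FILE_TYPE_ORDER
    · simp [hm]
    · simp [hm, PySem.Dict.getD_empty]
  have hB : order_files_py_alt files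
      = (List.range (FILE_TYPE_ORDER.length + 1)).flatMap
          (fun (r : Nat) => files.filter (fun kv => decide (FILE_TYPE_ORDER.idxOf kv.1 = r))) := by
    unfold order_files_py_alt
    simp only []
    rw [hkeyfun]
    have hperm := PySem.List.sorted_perm files
      (fun kv : String × String => ((FILE_TYPE_ORDER.idxOf kv.1 : Nat) : Int)) false
    have hnodup' : ((PySem.List.sorted files
        (fun kv : String × String => ((FILE_TYPE_ORDER.idxOf kv.1 : Nat) : Int)) false).map Prod.fst).Nodup :=
      ((hperm.map Prod.fst).nodup_iff).mpr hnd
    rw [pv_items_ofList _ hnodup']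
    rw [pv_sorted_buckets files _ FILE_TYPE_ORDER.length
        (fun x _ => ⟨by positivity, by exact_mod_cast List.idxOf_le_length⟩)]
    apply List.flatMap_congr
    intro r _
    apply List.filter_congr
    intro kv _
    apply decide_eq_decide.mpr
    exact Nat.cast_inj
  rw [hA, hB, List.range_succ, List.flatMap_append, List.flatMap_singleton]
  congr 1
  exact pv_known files hnd FILE_TYPE_ORDER hnodupOrd

-- ===== VERDICT (by name: the statement is the Claim_ definition above) =====
theorem order_files_py_spec : Claim_equal_order_files_py := by
  intro files _ hpre
  unfold Spec_order_files_py
  exact pv_main files hpre
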